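-- pv_equiv track=rewrite | github.com/djakub44/pp1 | 05-Test1/mock/kolokwium/p3.py | f
-- ===== SOURCE A (Python) =====
-- def f(t):
--     Result = ""
--     for i in range(len(t)):
--         for j in range(i+1):
--             Result += t[i]
--         if i != len(t)-1:
--             Result+="-"
--     return Result
-- ===== SOURCE B (Python) =====
-- def f(t):
--     return '-'.join(c * (i + 1) for i, c in enumerate(t))
-- ===== Notes on version B (the rewrite author's own statement) =====
-- stated objective: simpler
-- what changed: Replaces the index loop with an inner character-appending loop and a conditional separator flag by a single dash-join over enumerate(t) with each segment computed in closed form as c*(i+1).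
import Mathlib
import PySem

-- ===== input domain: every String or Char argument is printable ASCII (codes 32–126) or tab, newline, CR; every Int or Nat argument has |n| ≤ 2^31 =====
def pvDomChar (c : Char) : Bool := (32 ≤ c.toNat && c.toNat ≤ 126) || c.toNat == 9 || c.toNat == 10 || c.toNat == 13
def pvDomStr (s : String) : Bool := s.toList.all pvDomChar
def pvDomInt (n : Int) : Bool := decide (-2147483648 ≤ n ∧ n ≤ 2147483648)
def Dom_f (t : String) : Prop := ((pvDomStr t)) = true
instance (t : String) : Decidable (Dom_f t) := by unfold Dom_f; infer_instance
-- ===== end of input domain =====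

-- B replaces A's inner repetition loop and conditional separator by '-'.join over enumerate(t) with closed-form segments c*(i+1) (objective: simpler).

-- ===== PORT A =====
def f (t : String) : String :=
  let cs := t.toList
  let n : Int := cs.length
  String.ofList ((PySem.List.pyRange 0 n 1).foldl (fun res i =>
    let res := (PySem.List.pyRange 0 (i + 1) 1).foldl
      (fun r _ => r ++ [PySem.List.pyGetD cs i ' ']) res
    if i ≠ n - 1 then res ++ ['-'] else res) [])

-- ===== PORT B =====
def f_alt (t : String) : String :=
  PySem.Str.join "-" ((PySem.List.enumerate t.toList).map
    (fun p => String.ofList (List.replicate (p.1 + 1).toNat p.2)))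

-- ===== PRECONDITION & SPEC =====
def Spec_f (t : String) (out : String) : Prop := out = f_alt t
instance (t : String) (out : String) : Decidable (Spec_f t out) := by unfold Spec_f; infer_instance

-- ===== CLAIM (what is proved, stated in full; the proofs are below) =====
def Claim_equal_f : Prop := ∀ (t : String), Dom_f t → Spec_f t (f t)

-- ===== LEMMAS AND PROOFS =====

-- A's inner loop appends one fixed character per iteration.
theorem foldl_append_const {α : Type} (x : Char) (l : List α) (res : List Char) :
    l.foldl (fun r _ => r ++ [x]) res = res ++ List.replicate l.length x := by
  induction l generalizing res with
  | nil => simp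
  | cons a l ih =>
    simp [List.foldl_cons, ih, List.replicate_succ]

-- intercalate over segs ++ [last] = every earlier segment followed by the separator, then last.
theorem intercalate_append_last (segs : List (List Char)) (x : List Char) :
    List.intercalate ['-'] (segs ++ [x]) = segs.flatMap (fun s => s ++ ['-']) ++ x := by
  induction segs with
  | nil => simp [List.intercalate]
  | cons s segs ih =>
    have h2 : List.intercalate ['-'] (s :: (segs ++ [x]))
        = s ++ ['-'] ++ List.intercalate ['-'] (segs ++ [x]) := by
      cases segs with
      | nil => simpa [PySem.Chars.join] using PySem.Chars.join_cons_cons ['-'] s x []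
      | cons q rest =>
        simpa [PySem.Chars.join] using PySem.Chars.join_cons_cons ['-'] s q (rest ++ [x])
    rw [List.cons_append, h2, ih]
    simp [List.flatMap_cons, List.append_assoc]

-- dash-conditional flatMap over range 0 m equals intercalate of the mapped segments.
theorem flatMap_range_intercalate (g : Int → List Char) (m : Nat) :
    (PySem.List.pyRange 0 (m : Int) 1).flatMap
        (fun i => g i ++ if i ≠ (m : Int) - 1 then ['-'] else [])
      = List.intercalate ['-'] ((PySem.List.pyRange 0 (m : Int) 1).map g) := by
  cases m with
  | zero => simp [List.intercalate]
  | succ k =>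
    have hsplit : PySem.List.pyRange 0 ((k : Int) + 1)
        = PySem.List.pyRange 0 (k : Int) ++ [(k : Int)] :=
      PySem.List.pyRange_one_succ_right (by exact_mod_cast Nat.zero_le k)
    have hk : ((k + 1 : Nat) : Int) = (k : Int) + 1 := by push_cast; ring
    rw [hk, hsplit, List.flatMap_append, List.map_append]
    have hcong : (PySem.List.pyRange 0 (k : Int) 1).flatMap
          (fun i => g i ++ if i ≠ (k : Int) + 1 - 1 then ['-'] else [])
        = (PySem.List.pyRange 0 (k : Int) 1).flatMap (fun i => g i ++ ['-']) := by
      rw [List.flatMap_def, List.flatMap_def]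
      refine congrArg List.flatten (List.map_congr_left ?_)
      intro i hi
      have hlt : i < (k : Int) := (PySem.List.mem_pyRange_one.mp hi).2
      rw [if_pos (by omega : i ≠ (k : Int) + 1 - 1)]
    rw [hcong]
    have hlast : [(k : Int)].flatMap
        (fun i => g i ++ if i ≠ (k : Int) + 1 - 1 then ['-'] else []) = g (k : Int) := by
      simp
    rw [hlast, List.map_singleton, intercalate_append_last, List.flatMap_map]

-- ===== VERDICT (by name: the statement is the Claim_ definition above) =====
theorem f_spec : Claim_equal_f := by
  unfold Claim_equal_f Spec_f
  intro t _
  show f t = f_alt t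
  unfold f f_alt
  simp only []
  set cs := t.toList with hcs
  -- rewrite A's loop body into "append a closed-form segment"
  have hbody : (fun (res : List Char) (i : Int) =>
        let res := (PySem.List.pyRange 0 (i + 1) 1).foldl
          (fun r _ => r ++ [PySem.List.pyGetD cs i ' ']) res
        if i ≠ (cs.length : Int) - 1 then res ++ ['-'] else res)
      = fun res i => res ++
          (List.replicate (i + 1).toNat (PySem.List.pyGetD cs i ' ')
            ++ if i ≠ (cs.length : Int) - 1 then ['-'] else []) := by
    funext res i
    simp only [foldl_append_const, PySem.List.length_pyRange_one]
    split_ifs with h <;> simp [List.append_assoc]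
  rw [hbody, PySem.List.foldl_append_eq_flatMap, List.nil_append]
  rw [flatMap_range_intercalate (fun i => List.replicate (i + 1).toNat (PySem.List.pyGetD cs i ' ')) cs.length]
  -- B's side: enumerate as a map over the same range
  rw [PySem.Str.join]
  refine congrArg String.ofList ?_
  rw [PySem.List.enumerate_eq_map_pyRange cs ' ']
  have hsep : ("-" : String).toList = ['-'] := by decide
  rw [hsep]
  show List.intercalate ['-'] _ = PySem.Chars.join ['-'] _
  rw [PySem.Chars.join]
  refine congrArg (List.intercalate ['-']) ?_
  have hlen : PySem.List.len cs = (cs.length : Int) := by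
    simp [PySem.List.len]
  rw [hlen, List.map_map, List.map_map]
  refine List.map_congr_left ?_
  intro i _
  simp [String.toList_ofList]
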